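-- pv_equiv track=rewrite | github.com/phucmp/studyMaterial | AmazonInterview/cutoffRank.py | cutOffRank
-- ===== SOURCE A (Python) =====
-- def cutOffRank(scores, cutoff):
--     ranks = []
--     rank = 0
--     prev = -1
--     skip = 1
--     for score in sorted(scores, reverse=True):
--         if score == prev:
--             ranks.append(rank)
--             skip += 1
--         else:
--             rank += skip
--             ranks.append(rank)
--             skip = 1
--         prev = score
--
--     return len([rank for rank in ranks if rank <= cutoff])
-- ===== SOURCE B (Python) =====
-- def cutOffRank(scores, cutoff):
--     counts = {}
--     for s in scores:
--         counts[s] = counts.get(s, 0) + 1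
--     total = 0
--     index = 0
--     for score in sorted(counts, reverse=True):
--         if index + 1 <= cutoff:
--             total += counts[score]
--         index += counts[score]
--     return total
-- ===== Notes on version B (the rewrite author's own statement) =====
-- stated objective: alternative
-- what changed: B replaces A's per-element pass that builds a ranks list and then filters it by a single pass over the distinct scores (a count dict iterated in descending order), adding each group's size when its competition rank (elements already placed + 1) clears the cutoff; B also drops A's prev=-1 sentinel, which is the stated intended difference.
-- intended difference: When the maximum score is -1 and cutoff is 0, A's prev=-1 sentinel gives the whole top group rank 0 so A counts those competitors despite cutoff 0, while B gives them rank 1 and returns 0 — the intended value, since competition ranks start at 1 and cutoff 0 should admit nobody. — e.g. on cutOffRank([-1], 0): A returns 1, B returns 0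
import Mathlib
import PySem

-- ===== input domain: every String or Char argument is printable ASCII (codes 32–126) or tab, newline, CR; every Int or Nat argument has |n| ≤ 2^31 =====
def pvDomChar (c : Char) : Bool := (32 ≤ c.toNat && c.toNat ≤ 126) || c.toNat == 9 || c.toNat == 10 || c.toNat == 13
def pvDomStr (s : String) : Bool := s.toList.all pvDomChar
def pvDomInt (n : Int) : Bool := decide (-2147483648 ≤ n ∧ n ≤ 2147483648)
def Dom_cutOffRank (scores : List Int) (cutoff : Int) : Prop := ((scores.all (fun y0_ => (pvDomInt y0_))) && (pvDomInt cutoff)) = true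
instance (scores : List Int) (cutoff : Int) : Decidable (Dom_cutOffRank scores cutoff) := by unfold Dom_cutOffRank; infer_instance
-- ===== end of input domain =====

-- B replaces A's per-element ranks list by one pass over the distinct scores (a counter dict,
-- sorted descending), adding each group's size when its competition rank clears the cutoff;
-- B also ranks a maximal score of -1 as 1 (A's prev=-1 sentinel gives it rank 0) — see D_ below.

-- ===== PORT A =====
-- one loop step of A: state (ranks, rank, prev, skip)
def stepA (st : List Int × Int × Int × Int) (score : Int) : List Int × Int × Int × Int :=
  match st with
  | (ranks, rank, prev, skip) =>
    if score = prev then (ranks ++ [rank], rank, score, skip + 1)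
    else (ranks ++ [rank + skip], rank + skip, score, 1)

def cutOffRank (scores : List Int) (cutoff : Int) : Int :=
  let st := (PySem.List.sorted scores (fun x => x) true).foldl stepA ([], 0, -1, 1)
  ((st.1.filter (fun r => decide (r ≤ cutoff))).length : Int)

-- ===== PORT B =====
-- one loop step of B: state (total, index); counts[score] is exact as getD since score ∈ counts.keys
def stepB (counts : PySem.Dict Int Int) (cutoff : Int) (p : Int × Int) (score : Int) : Int × Int :=
  (if p.2 + 1 ≤ cutoff then p.1 + counts.getD score 0 else p.1, p.2 + counts.getD score 0)

def cutOffRank_alt (scores : List Int) (cutoff : Int) : Int :=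
  let counts := scores.foldl (fun d s => d.insert s (d.getD s 0 + 1)) PySem.Dict.empty
  ((PySem.List.sorted counts.keys (fun x => x) true).foldl (stepB counts cutoff) (0, 0)).1

-- ===== PRECONDITION & SPEC =====
-- When the maximum score is -1 and cutoff is 0, A's prev = -1 sentinel gives the whole top group
-- rank 0, so A counts those competitors despite cutoff 0, while B gives them rank 1 and returns 0 —
-- the intended value, since competition ranks start at 1 and cutoff 0 should admit nobody.
def D_cutOffRank (scores : List Int) (cutoff : Int) : Prop :=
  cutoff = 0 ∧ (-1 : Int) ∈ scores ∧ ∀ s ∈ scores, s ≤ -1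
instance (scores : List Int) (cutoff : Int) : Decidable (D_cutOffRank scores cutoff) := by
  unfold D_cutOffRank; infer_instance

def Spec_cutOffRank (scores : List Int) (cutoff : Int) (out : Int) : Prop :=
  ¬ D_cutOffRank scores cutoff → out = cutOffRank_alt scores cutoff
instance (scores : List Int) (cutoff : Int) (out : Int) : Decidable (Spec_cutOffRank scores cutoff out) := by
  unfold Spec_cutOffRank; infer_instance

def pvDiffWitness_cutOffRank : List Int × Int := ([-1], 0)
def pvDiffWitnessOut_cutOffRank : Int × Int := (1, 0)

-- ===== CLAIM (what is proved, stated in full; the proofs are below) =====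
def Claim_unchanged_cutOffRank : Prop := ∀ (scores : List Int) (cutoff : Int), Dom_cutOffRank scores cutoff → Spec_cutOffRank scores cutoff (cutOffRank scores cutoff)
def Claim_changed_cutOffRank : Prop := Dom_cutOffRank (pvDiffWitness_cutOffRank.1) (pvDiffWitness_cutOffRank.2) ∧ D_cutOffRank (pvDiffWitness_cutOffRank.1) (pvDiffWitness_cutOffRank.2) ∧ cutOffRank (pvDiffWitness_cutOffRank.1) (pvDiffWitness_cutOffRank.2) = pvDiffWitnessOut_cutOffRank.1 ∧ cutOffRank_alt (pvDiffWitness_cutOffRank.1) (pvDiffWitness_cutOffRank.2) = pvDiffWitnessOut_cutOffRank.2 ∧ pvDiffWitnessOut_cutOffRank.1 ≠ pvDiffWitnessOut_cutOffRank.2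
def Claim_exact_cutOffRank : Prop := ∀ (scores : List Int) (cutoff : Int), Dom_cutOffRank scores cutoff → D_cutOffRank scores cutoff → cutOffRank scores cutoff ≠ cutOffRank_alt scores cutoff

-- ===== LEMMAS AND PROOFS =====

-- generic form of B's loop step, with the group sizes abstracted to a function c
def gstep (c : Int → Int) (cutoff : Int) (p : Int × Int) (v : Int) : Int × Int :=
  (if p.2 + 1 ≤ cutoff then p.1 + c v else p.1, p.2 + c v)

-- A run of j copies of the current prev value: each appends the current rank, skip grows by j.
theorem stepA_run_eq (j : Nat) : ∀ (ranks : List Int) (rank skip v : Int),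
    (List.replicate j v).foldl stepA (ranks, rank, v, skip)
      = (ranks ++ List.replicate j rank, rank, v, skip + j) := by
  induction j with
  | zero => intro ranks rank skip v; simp
  | succ j ih =>
    intro ranks rank skip v
    rw [List.replicate_succ, List.foldl_cons,
        show stepA (ranks, rank, v, skip) v = (ranks ++ [rank], rank, v, skip + 1) by
          simp [stepA],
        ih]
    simp [List.replicate_succ]
    omega

-- A fresh group of k copies of v (prev ≠ v): all get rank+skip, final skip = k.
theorem stepA_group (k : Nat) (hk : 1 ≤ k) (v : Int) (ranks : List Int) (rank prev skip : Int)
    (h : prev ≠ v) :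
    (List.replicate k v).foldl stepA (ranks, rank, prev, skip)
      = (ranks ++ List.replicate k (rank + skip), rank + skip, v, (k : Int)) := by
  obtain ⟨j, rfl⟩ : ∃ j, k = j + 1 := ⟨k - 1, by omega⟩
  rw [List.replicate_succ, List.foldl_cons,
      show stepA (ranks, rank, prev, skip) v = (ranks ++ [rank + skip], rank + skip, v, 1) by
        simp [stepA, Ne.symm h],
      stepA_run_eq]
  simp [List.replicate_succ]
  omega

-- the accumulated total shifts out of B's fold
theorem gstep_shift (c : Int → Int) (cutoff : Int) (K : List Int) : ∀ (t i : Int),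
    (K.foldl (gstep c cutoff) (t, i)).1 = t + (K.foldl (gstep c cutoff) (0, i)).1 := by
  induction K with
  | nil => intro t i; simp
  | cons v K ih =>
    intro t i
    simp only [List.foldl_cons, gstep]
    rw [ih, ih (if i + 1 ≤ cutoff then 0 + c v else 0)]
    split_ifs <;> ring

-- MAIN: A's fold over the grouped sorted list counts exactly what B's fold over the groups counts.
theorem main_lemma (cutoff : Int) (cnt : Int → Nat) (c : Int → Int) (K : List Int) :
    (∀ v ∈ K, c v = (cnt v : Int)) → (∀ v ∈ K, 1 ≤ cnt v) → K.Pairwise (· > ·) →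
    ∀ (ranks : List Int) (rank skip base prev : Int),
    (∀ h t, K = h :: t → prev ≠ h) → rank + skip = base + 1 →
    ((((K.flatMap (fun v => List.replicate (cnt v) v)).foldl stepA (ranks, rank, prev, skip)).1.filter
        (fun r => decide (r ≤ cutoff))).length : Int)
      = ((ranks.filter (fun r => decide (r ≤ cutoff))).length : Int)
        + (K.foldl (gstep c cutoff) (0, base)).1 := by
  induction K with
  | nil => intro _ _ _ ranks rank skip base prev _ _; simp
  | cons v K ih =>
    intro hc hpos hpair ranks rank skip base prev hprev hrs
    have hgt : ∀ u ∈ K, v > u := (List.pairwise_cons.mp hpair).1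
    rw [List.flatMap_cons, List.foldl_append,
        stepA_group (cnt v) (hpos v (List.mem_cons_self)) v ranks rank prev skip
          (hprev v K rfl), hrs]
    rw [ih (fun u hu => hc u (List.mem_cons_of_mem v hu))
          (fun u hu => hpos u (List.mem_cons_of_mem v hu))
          (List.pairwise_cons.mp hpair).2
          (ranks ++ List.replicate (cnt v) (base + 1)) (base + 1) (cnt v)
          (base + (cnt v)) v
          (fun h t ht => by have := hgt h (ht ▸ List.mem_cons_self); omega)
          (by ring)]
    simp only [List.foldl_cons, gstep]
    rw [List.filter_append, List.length_append, List.filter_replicate,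
        hc v List.mem_cons_self]
    by_cases hcut : base + 1 ≤ cutoff
    · simp only [hcut, decide_true, if_true, List.length_replicate, zero_add]
      rw [gstep_shift c cutoff K ((cnt v : Int)) (base + (cnt v : Int))]
      push_cast
      ring
    · simp only [hcut, decide_false, if_false]
      simp

-- K, the descending list of distinct scores, and its basic facts
theorem counts_eq (scores : List Int) :
    scores.foldl (fun d s => d.insert s (d.getD s 0 + 1)) PySem.Dict.empty
      = PySem.Dict.counter scores :=
  PySem.Dict.foldl_insert_getD_add_one_eq_counter scores

theorem mem_K (scores : List Int) (x : Int) :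
    x ∈ PySem.List.sorted (PySem.Dict.counter scores).keys (fun y => y) true ↔ x ∈ scores := by
  rw [PySem.List.mem_sorted, PySem.Dict.keys_counter, PySem.Set.mem_ofList]

theorem K_pairwise (scores : List Int) :
    (PySem.List.sorted (PySem.Dict.counter scores).keys (fun y => y) true).Pairwise (· > ·) := by
  have hnd : (PySem.List.sorted (PySem.Dict.counter scores).keys (fun y => y) true).Nodup :=
    ((PySem.List.sorted_perm _ _ _).nodup_iff).mpr (PySem.Dict.nodup_keys_counter scores)
  have hge := PySem.List.sorted_pairwise_rev (PySem.Dict.counter scores).keys (fun y => y)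
  exact (hge.and hnd).imp (fun h => by omega)

-- the sorted-descending score list is the concatenation of its groups, by distinct value
theorem flat_pairwise (K : List Int) (cnt : Int → Nat) (h : K.Pairwise (· > ·)) :
    (K.flatMap (fun v => List.replicate (cnt v) v)).Pairwise (· ≥ ·) := by
  induction K with
  | nil => simp
  | cons v K ih =>
    rw [List.flatMap_cons, List.pairwise_append]
    refine ⟨List.pairwise_replicate.mpr (Or.inr le_rfl), ih (List.pairwise_cons.mp h).2, ?_⟩
    intro a ha b hb
    rw [List.eq_of_mem_replicate ha]
    obtain ⟨u, hu, hbu⟩ := List.mem_flatMap.mp hb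
    rw [List.eq_of_mem_replicate hbu]
    exact le_of_lt ((List.pairwise_cons.mp h).1 u hu)

theorem count_flat (K : List Int) (cnt : Int → Nat) (h : K.Pairwise (· > ·)) (x : Int) :
    (K.flatMap (fun v => List.replicate (cnt v) v)).count x = if x ∈ K then cnt x else 0 := by
  induction K with
  | nil => simp
  | cons v K ih =>
    rw [List.flatMap_cons, List.count_append, List.count_replicate,
        ih (List.pairwise_cons.mp h).2]
    have hgt : ∀ u ∈ K, v > u := (List.pairwise_cons.mp h).1
    by_cases hxv : x = v
    · subst hxv
      have : x ∉ K := fun hx => absurd (hgt x hx) (lt_irrefl x)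
      simp [this]
    · simp [hxv, Ne.symm hxv, List.mem_cons]

theorem sorted_eq_flat (scores : List Int) :
    PySem.List.sorted scores (fun y => y) true
      = (PySem.List.sorted (PySem.Dict.counter scores).keys (fun y => y) true).flatMap
          (fun v => List.replicate (scores.count v) v) := by
  set K := PySem.List.sorted (PySem.Dict.counter scores).keys (fun y => y) true with hK
  have hpair := K_pairwise scores
  apply List.Perm.eq_of_pairwise (le := (· ≥ · : Int → Int → Prop))
      (fun a b _ _ h1 h2 => le_antisymm h2 h1)
      ((PySem.List.sorted_pairwise_rev scores (fun y => y)).imp (fun h => h))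
      (flat_pairwise _ _ hpair)
  refine ((PySem.List.sorted_perm scores (fun y => y) true).trans ?_)
  rw [List.perm_iff_count]
  intro x
  rw [count_flat K _ hpair x]
  by_cases hx : x ∈ scores
  · rw [if_pos ((mem_K scores x).mpr hx)]
  · rw [if_neg (fun hxk => hx ((mem_K scores x).mp hxk)), List.count_eq_zero_of_not_mem hx]

theorem head_le (scores : List Int) (m : Int) (t : List Int)
    (h : PySem.List.sorted (PySem.Dict.counter scores).keys (fun y => y) true = m :: t) :
    ∀ s ∈ scores, s ≤ m := by
  intro s hs
  exact PySem.List.key_head_sorted_rev_ge _ _ h s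
    (by rw [PySem.Dict.keys_counter, PySem.Set.mem_ofList]; exact hs)

theorem main_both (scores : List Int) (cutoff : Int) :
    (D_cutOffRank scores cutoff → cutOffRank scores cutoff = cutOffRank_alt scores cutoff + (scores.count (-1) : Int)) ∧
    (¬ D_cutOffRank scores cutoff → cutOffRank scores cutoff = cutOffRank_alt scores cutoff) := by
  set K := PySem.List.sorted (PySem.Dict.counter scores).keys (fun y => y) true with hKdef
  set c : Int → Int := fun v => (PySem.Dict.counter scores).getD v 0 with hcdef
  have hpair : K.Pairwise (· > ·) := K_pairwise scores
  have hc : ∀ v ∈ K, c v = ((scores.count v : Nat) : Int) :=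
    fun v _ => PySem.Dict.getD_counter scores v
  have hpos : ∀ v ∈ K, 1 ≤ scores.count v :=
    fun v hv => List.count_pos_iff.mpr ((mem_K scores v).mp hv)
  have hB : cutOffRank_alt scores cutoff = (K.foldl (gstep c cutoff) (0, 0)).1 := by
    simp only [cutOffRank_alt, counts_eq]
    rfl
  have hA : cutOffRank scores cutoff
      = ((((K.flatMap (fun v => List.replicate (scores.count v) v)).foldl stepA
            ([], 0, -1, 1)).1.filter (fun r => decide (r ≤ cutoff))).length : Int) := by
    simp only [cutOffRank]
    rw [sorted_eq_flat]
  cases hKs : K with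
  | nil =>
    constructor
    · intro hd
      have hmem : (-1 : Int) ∈ K := (mem_K scores (-1)).mpr hd.2.1
      rw [hKs] at hmem
      exact absurd hmem (List.not_mem_nil)
    · intro _
      rw [hA, hB, hKs]
      simp
  | cons m t =>
    have hmK : m ∈ K := by rw [hKs]; exact List.mem_cons_self
    have hm_mem : m ∈ scores := (mem_K scores m).mp hmK
    have hle : ∀ s ∈ scores, s ≤ m := head_le scores m t (hKdef.symm.trans hKs)
    have hpair' : t.Pairwise (· > ·) := (List.pairwise_cons.mp (hKs ▸ hpair)).2
    have hgt : ∀ u ∈ t, m > u := (List.pairwise_cons.mp (hKs ▸ hpair)).1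
    have hc' : ∀ v ∈ t, c v = ((scores.count v : Nat) : Int) :=
      fun v hv => hc v (by rw [hKs]; exact List.mem_cons_of_mem m hv)
    have hpos' : ∀ v ∈ t, 1 ≤ scores.count v :=
      fun v hv => hpos v (by rw [hKs]; exact List.mem_cons_of_mem m hv)
    by_cases hm : m = -1
    · -- quirk case: the maximum score is -1
      subst hm
      have hall : ∀ s ∈ scores, s ≤ -1 := hle
      have hprev' : ∀ h t', t = h :: t' → (-1 : Int) ≠ h := by
        intro h t' heq
        have := hgt h (heq ▸ List.mem_cons_self)
        omega
      have hAq : cutOffRank scores cutoff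
          = (if (0 : Int) ≤ cutoff then ((scores.count (-1) : Nat) : Int) else 0)
            + (t.foldl (gstep c cutoff) (0, ((scores.count (-1) : Nat) : Int))).1 := by
        rw [hA, hKs, List.flatMap_cons, List.foldl_append, stepA_run_eq,
            main_lemma cutoff (fun v => scores.count v) c t hc' hpos' hpair'
              ([] ++ List.replicate (scores.count (-1)) 0) 0 (1 + (scores.count (-1) : Int))
              ((scores.count (-1) : Int)) (-1) hprev' (by ring)]
        rw [List.nil_append, List.filter_replicate]
        by_cases hcut : (0 : Int) ≤ cutoff
        · simp [hcut]
        · simp [hcut]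
      have hBq : cutOffRank_alt scores cutoff
          = (if (1 : Int) ≤ cutoff then ((scores.count (-1) : Nat) : Int) else 0)
            + (t.foldl (gstep c cutoff) (0, ((scores.count (-1) : Nat) : Int))).1 := by
        rw [hB, hKs, List.foldl_cons]
        show (t.foldl (gstep c cutoff)
          (if (0 : Int) + 1 ≤ cutoff then 0 + c (-1) else 0, 0 + c (-1))).1 = _
        rw [gstep_shift c cutoff t (if (0 : Int) + 1 ≤ cutoff then 0 + c (-1) else 0) (0 + c (-1)),
            hc (-1) hmK]
        by_cases hcut : (1 : Int) ≤ cutoff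
        · rw [if_pos (by omega : (0 : Int) + 1 ≤ cutoff), if_pos hcut]
          norm_num
        · rw [if_neg (by omega : ¬ ((0 : Int) + 1 ≤ cutoff)), if_neg hcut]
          norm_num
      constructor
      · intro hd
        rw [hAq, hBq, hd.1]
        norm_num
        ring
      · intro hnd
        have hc0 : cutoff ≠ 0 := fun h => hnd ⟨h, hm_mem, hall⟩
        rw [hAq, hBq]
        by_cases hcut : (1 : Int) ≤ cutoff
        · rw [if_pos (by omega), if_pos hcut]
        · rw [if_neg (by omega), if_neg hcut]
    · -- normal case: A's prev = -1 sentinel never fires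
      have hD : ¬ D_cutOffRank scores cutoff := by
        intro hd
        exact hm (le_antisymm (hd.2.2 m hm_mem) (hle _ hd.2.1))
      have hprev : ∀ h t', K = h :: t' → (-1 : Int) ≠ h := by
        intro h t' heq
        rw [hKs] at heq
        cases heq
        exact fun e => hm e.symm
      have heq : cutOffRank scores cutoff = cutOffRank_alt scores cutoff := by
        rw [hA, hB,
            main_lemma cutoff (fun v => scores.count v) c K hc hpos hpair
              [] 0 1 0 (-1) hprev (by ring)]
        simp
      exact ⟨fun hd => absurd hd hD, fun _ => heq⟩

-- ===== VERDICT (by name: the statement is the Claim_ definition above) =====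
theorem cutOffRank_spec : Claim_unchanged_cutOffRank := by
  intro scores cutoff _ hnd
  exact (main_both scores cutoff).2 hnd

theorem cutOffRank_changed : Claim_changed_cutOffRank := by
  unfold Claim_changed_cutOffRank; decide

theorem cutOffRank_tight : Claim_exact_cutOffRank := by
  intro scores cutoff _ hd
  rw [(main_both scores cutoff).1 hd]
  have : 0 < scores.count (-1) := List.count_pos_iff.mpr hd.2.1
  intro h; omega
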